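-- pv_equiv track=rewrite | github.com/lynn2089/SmartLite | data_processing_in_db.py | array2int
-- ===== SOURCE A (Python) =====
-- def array2int (len_array, array_input, array_kernel):
--     sum_input = 0
--     sum_kernel = 0
--     tmp_length = 0
--     for i in range(len_array):
--         t = len_array - i - 1
--         if array_input[t] and array_kernel[t]:
--             if array_input[t] > 0:
--                 sum_input = sum_input + pow(2, tmp_length)
--             if array_kernel[t] > 0:
--                 sum_kernel = sum_kernel + pow(2, tmp_length)
--             tmp_length = tmp_length + 1
--
--     return sum_input, sum_kernel, tmp_length
-- ===== SOURCE B (Python) =====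
-- def array2int(len_array, array_input, array_kernel):
--     # Staged pipeline: collect the matched (input, kernel) pairs once, then
--     # read each binary value msb-first by Horner in a separate pass.
--     n = max(len_array, 0)
--     pairs = [(a, k) for a, k in zip(array_input[:n], array_kernel[:n]) if a and k]
--     s_input = 0
--     for a, _ in pairs:
--         s_input = 2 * s_input + (1 if a > 0 else 0)
--     s_kernel = 0
--     for _, k in pairs:
--         s_kernel = 2 * s_kernel + (1 if k > 0 else 0)
--     return s_input, s_kernel, len(pairs)
-- ===== Notes on version B (the rewrite author's own statement) =====
-- stated objective: alternative
-- what changed: B replaces A's single backward indexed loop with pow(2, tmp_length) running sums by a staged pipeline: slice-and-zip the arrays, filter the positions where both are nonzero into a pair list, then compute each value msb-first by a separate Horner pass and the length from the list.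
import Mathlib
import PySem

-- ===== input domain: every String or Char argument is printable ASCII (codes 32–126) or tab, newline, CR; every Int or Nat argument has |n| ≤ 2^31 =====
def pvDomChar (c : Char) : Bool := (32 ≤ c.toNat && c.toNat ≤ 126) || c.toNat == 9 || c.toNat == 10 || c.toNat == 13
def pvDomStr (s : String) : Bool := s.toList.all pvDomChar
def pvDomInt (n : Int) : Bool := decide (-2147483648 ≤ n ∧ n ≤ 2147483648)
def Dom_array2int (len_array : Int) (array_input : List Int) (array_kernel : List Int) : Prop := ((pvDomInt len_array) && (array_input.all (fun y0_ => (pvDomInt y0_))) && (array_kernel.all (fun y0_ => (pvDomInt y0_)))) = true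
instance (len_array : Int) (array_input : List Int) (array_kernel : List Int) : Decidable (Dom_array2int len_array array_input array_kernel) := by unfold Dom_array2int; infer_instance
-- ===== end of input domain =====

-- B replaces A's backward indexed loop with pow(2, tmp_length) running sums by a
-- staged pipeline: zip + filter the matched pairs, then separate Horner passes.

-- ===== PORT A =====
-- A's loop body at position t: add pow(2, tmp_length) weights, bump the counter.
def stepAt (array_input array_kernel : List Int) (st : Int × Int × Int) (t : Int) : Int × Int × Int :=
  if ¬ PySem.List.pyGetD array_input t 0 = 0 ∧ ¬ PySem.List.pyGetD array_kernel t 0 = 0 then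
    ((if 0 < PySem.List.pyGetD array_input t 0 then st.1 + 2 ^ st.2.2.toNat else st.1),
     (if 0 < PySem.List.pyGetD array_kernel t 0 then st.2.1 + 2 ^ st.2.2.toNat else st.2.1),
     st.2.2 + 1)
  else st

def array2int (len_array : Int) (array_input : List Int) (array_kernel : List Int) : Int × Int × Int :=
  (PySem.List.pyRange 0 len_array 1).foldl
    (fun st i => stepAt array_input array_kernel st (len_array - i - 1)) (0, 0, 0)

-- ===== PORT B =====
def array2int_alt (len_array : Int) (array_input : List Int) (array_kernel : List Int) : Int × Int × Int :=
  let n := max len_array 0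
  let pairs := ((PySem.List.slice array_input none (some n)).zip
                  (PySem.List.slice array_kernel none (some n))).filter
                 (fun p => decide (¬ p.1 = 0 ∧ ¬ p.2 = 0))
  let sInput := pairs.foldl (fun s p => 2 * s + (if 0 < p.1 then 1 else 0)) 0
  let sKernel := pairs.foldl (fun s p => 2 * s + (if 0 < p.2 then 1 else 0)) 0
  (sInput, sKernel, (pairs.length : Int))

-- ===== PRECONDITION & SPEC =====
-- Pre_ excludes exactly the inputs where A raises IndexError: some visited index t < len_array
-- out of range for array_input, or (when array_input[t] is truthy) for array_kernel.
def Pre_array2int (len_array : Int) (array_input : List Int) (array_kernel : List Int) : Prop :=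
  len_array ≤ (array_input.length : Int) ∧
  ∀ t < len_array.toNat, array_input.getD t 0 ≠ 0 → t < array_kernel.length
instance (len_array : Int) (array_input : List Int) (array_kernel : List Int) : Decidable (Pre_array2int len_array array_input array_kernel) := by unfold Pre_array2int; infer_instance
def pvWitness_array2int : Int × List Int × List Int := (2, [1, -2], [3, 1])

def Spec_array2int (len_array : Int) (array_input : List Int) (array_kernel : List Int) (out : Int × Int × Int) : Prop := out = array2int_alt len_array array_input array_kernel
instance (len_array : Int) (array_input : List Int) (array_kernel : List Int) (out : Int × Int × Int) : Decidable (Spec_array2int len_array array_input array_kernel out) := by unfold Spec_array2int; infer_instance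

-- ===== CLAIM (what is proved, stated in full; the proofs are below) =====
def Claim_equal_array2int : Prop := ∀ (len_array : Int) (array_input : List Int) (array_kernel : List Int), Dom_array2int len_array array_input array_kernel → Pre_array2int len_array array_input array_kernel → Spec_array2int len_array array_input array_kernel (array2int len_array array_input array_kernel)

-- ===== LEMMAS AND PROOFS =====

-- Proof-side forward Horner step over an absolute index (used only to bridge A to B).
def stepF (array_input array_kernel : List Int) (st : Int × Int × Int) (t : Int) : Int × Int × Int :=
  if ¬ PySem.List.pyGetD array_input t 0 = 0 ∧ ¬ PySem.List.pyGetD array_kernel t 0 = 0 then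
    (2 * st.1 + (if 0 < PySem.List.pyGetD array_input t 0 then 1 else 0),
     2 * st.2.1 + (if 0 < PySem.List.pyGetD array_kernel t 0 then 1 else 0),
     st.2.2 + 1)
  else st

-- Proof-side combined step over a pair (the filtered-list fold's body).
def stepP (st : Int × Int × Int) (p : Int × Int) : Int × Int × Int :=
  (2 * st.1 + (if 0 < p.1 then 1 else 0),
   2 * st.2.1 + (if 0 < p.2 then 1 else 0),
   st.2.2 + 1)

-- Shift lemma: A-style folding from a shifted state (a, b, c), 0 ≤ c, scales the
-- fold-from-zero result by 2^c and offsets the accumulators.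
theorem stepAt_shift (inp ker : List Int) (l : List Int) :
    ∀ (a b c : Int), 0 ≤ c →
      l.foldl (stepAt inp ker) (a, b, c) =
        (a + 2 ^ c.toNat * (l.foldl (stepAt inp ker) (0, 0, 0)).1,
         b + 2 ^ c.toNat * (l.foldl (stepAt inp ker) (0, 0, 0)).2.1,
         c + (l.foldl (stepAt inp ker) (0, 0, 0)).2.2) := by
  induction l with
  | nil => intro a b c hc; simp
  | cons t l ih =>
    intro a b c hc
    simp only [List.foldl_cons]
    by_cases hm : ¬ PySem.List.pyGetD inp t 0 = 0 ∧ ¬ PySem.List.pyGetD ker t 0 = 0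
    · simp only [stepAt, if_pos hm]
      rw [ih _ _ (c + 1) (by omega), ih _ _ ((0 : Int) + 1) (by omega)]
      have hpow : (2 : Int) ^ (c + 1).toNat = 2 ^ c.toNat * 2 := by
        have h : (c + 1).toNat = c.toNat + 1 := by omega
        rw [h, pow_succ]
      have h1 : ((0 : Int) + 1).toNat = 1 := by norm_num
      have h0 : ((0 : Int)).toNat = 0 := rfl
      rw [hpow, h1, h0]
      split_ifs <;> simp only [Prod.mk.injEq] <;>
        refine ⟨by ring, by ring, by ring⟩
    · simp only [stepAt, if_neg hm]
      exact ih a b c hc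

-- Core: A's pow-weight scan over the REVERSED index list equals a forward Horner scan.
theorem rev_foldA_eq_foldF (inp ker : List Int) (l : List Int) :
    l.reverse.foldl (stepAt inp ker) (0, 0, 0) = l.foldl (stepF inp ker) (0, 0, 0) := by
  induction l using List.reverseRecOn with
  | nil => simp
  | append_singleton l t ih =>
    rw [List.reverse_append, List.reverse_singleton, List.singleton_append,
        List.foldl_cons, List.foldl_append, List.foldl_cons, List.foldl_nil, ← ih]
    by_cases hm : ¬ PySem.List.pyGetD inp t 0 = 0 ∧ ¬ PySem.List.pyGetD ker t 0 = 0
    · simp only [stepAt, stepF, if_pos hm]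
      rw [stepAt_shift inp ker l.reverse _ _ ((0 : Int) + 1) (by omega)]
      have h1 : ((0 : Int) + 1).toNat = 1 := by norm_num
      have h0 : ((0 : Int)).toNat = 0 := rfl
      rw [h1, h0]
      split_ifs <;> simp only [Prod.mk.injEq] <;>
        refine ⟨by ring, by ring, by ring⟩
    · simp only [stepAt, stepF, if_neg hm]

-- A's visited positions len-1-i, i ∈ range(len), are the reverse of range(len).
theorem map_desc_eq_reverse (len : Int) :
    (PySem.List.pyRange 0 len 1).map (fun i => len - i - 1) =
      (PySem.List.pyRange 0 len 1).reverse := by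
  have h := PySem.List.pyRange_neg_one_eq_reverse (len - 1) (-1)
  simp only [show (-1 : Int) + 1 = 0 by norm_num, show len - 1 + 1 = len by ring] at h
  rw [← h, PySem.List.pyRange_neg_one, PySem.List.pyRange_one, List.map_map]
  have hn : (len - 0).toNat = (len - 1 - (-1)).toNat := by omega
  rw [hn]
  refine List.map_congr_left ?_
  intro k _
  simp only [Function.comp_apply]
  ring

-- Forward index fold over range m = combined fold over the zipped prefix.
theorem foldF_range_eq_zip (inp ker : List Int) :
    ∀ (m : Nat) (st : Int × Int × Int),
      (List.range m).foldl (fun s (t : Nat) => stepF inp ker s (t : Int)) st =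
        ((inp.zip ker).take m).foldl
          (fun s p => if ¬ p.1 = 0 ∧ ¬ p.2 = 0 then stepP s p else s) st := by
  intro m
  induction m with
  | zero => intro st; simp
  | succ m ih =>
    intro st
    rw [List.range_succ, List.foldl_append, List.foldl_cons, List.foldl_nil, ih]
    rw [List.take_add_one]
    rw [List.foldl_append]
    by_cases hm : m < (inp.zip ker).length
    · have hgi : m < inp.length := by simp [List.length_zip] at hm; omega
      have hgk : m < ker.length := by simp [List.length_zip] at hm; omega
      have hz : (inp.zip ker)[m]?.toList = [(inp[m], ker[m])] := by
        simp [List.getElem?_eq_getElem hm]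
      rw [hz, List.foldl_cons, List.foldl_nil]
      simp only [stepF, stepP, PySem.List.pyGetD_natCast,
        List.getD_eq_getElem?_getD, List.getElem?_eq_getElem hgi,
        List.getElem?_eq_getElem hgk, Option.getD_some]
    · have hz : (inp.zip ker)[m]?.toList = [] := by
        simp [List.getElem?_eq_none (by omega : (inp.zip ker).length ≤ m)]
      rw [hz, List.foldl_nil]
      have hor : inp.length ≤ m ∨ ker.length ≤ m := by
        simp [List.length_zip] at hm; omega
      have h0 : PySem.List.pyGetD inp (m : Int) 0 = 0 ∨
                PySem.List.pyGetD ker (m : Int) 0 = 0 := by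
        rcases hor with h | h
        · left; simp [PySem.List.pyGetD_natCast, List.getD_eq_getElem?_getD,
            List.getElem?_eq_none h]
        · right; simp [PySem.List.pyGetD_natCast, List.getD_eq_getElem?_getD,
            List.getElem?_eq_none h]
      have : ¬ (¬ PySem.List.pyGetD inp (m : Int) 0 = 0 ∧
                ¬ PySem.List.pyGetD ker (m : Int) 0 = 0) := by tauto
      simp only [stepF, if_neg this]

-- Splitting the combined stepP fold into B's three components.
theorem foldP_split (l : List (Int × Int)) :
    ∀ (a b c : Int),
      l.foldl stepP (a, b, c) =
        (l.foldl (fun s p => 2 * s + (if 0 < p.1 then 1 else 0)) a,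
         l.foldl (fun s p => 2 * s + (if 0 < p.2 then 1 else 0)) b,
         c + (l.length : Int)) := by
  induction l with
  | nil => intro a b c; simp
  | cons p l ih =>
    intro a b c
    simp only [List.foldl_cons, List.length_cons, stepP, ih]
    refine congrArg _ (congrArg _ ?_)
    push_cast; ring

-- ===== VERDICT (by name: the statement is the Claim_ definition above) =====
theorem array2int_spec : Claim_equal_array2int := by
  intro len_array array_input array_kernel _ _
  unfold Spec_array2int array2int array2int_alt
  rw [show (fun st i => stepAt array_input array_kernel st (len_array - i - 1)) =
        (fun st i => stepAt array_input array_kernel st ((fun j => len_array - j - 1) i)) from rfl,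
      ← List.foldl_map, map_desc_eq_reverse len_array,
      rev_foldA_eq_foldF array_input array_kernel]
  have hmax : (max len_array 0) = ((len_array.toNat : Nat) : Int) := by omega
  have hrange : PySem.List.pyRange 0 len_array 1 =
      (List.range len_array.toNat).map (fun k : Nat => (k : Int)) := by
    rw [PySem.List.pyRange_one]; norm_num
  rw [hrange, List.foldl_map,
      foldF_range_eq_zip array_input array_kernel len_array.toNat,
      PySem.List.foldl_ite_eq_foldl_filter, foldP_split]
  have hz : ∀ (a b : List Int),
      (a.take len_array.toNat).zip (b.take len_array.toNat) = (a.zip b).take len_array.toNat := by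
    intro a b; simp [List.zip, List.take_zipWith]
  simp only [hmax, PySem.List.slice_to_natCast, hz]
  simp
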